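-- pv_equiv track=rewrite | github.com/eliassondavid/paragrafen-ai | normalize/ocr_normalizer.py | normalize_ocr_spacing
-- ===== SOURCE A (Python) =====
-- def normalize_ocr_spacing(text: str) -> str:
--     """Normaliserar OCR-artefakter där enstaka tecken/siffror separerats av mellanslag.
--
--     Regler:
--     - Sekvens av ≥2 tokens med exakt 1 bokstav vardera → sammanfogas
--       ('r ä t t e g å n g' → 'rättegång')
--     - Sekvens av ≥2 tokens med 1–2 siffror vardera → sammanfogas
--       ('s t o c k h o l m 19 3 8' → 'stockholm 1938')
--     - Normal text lämnas orörd.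
--
--     Algoritm: Token-baserad vänster-till-höger genomgång med girig matchning.
--     """
--     tokens = text.split(" ")
--     result = []
--     i = 0
--     while i < len(tokens):
--         tok = tokens[i]
--
--         # Bokstavssekvens: exakt 1 Unicode-bokstav per token
--         if len(tok) == 1 and tok.isalpha():
--             group = [tok]
--             j = i + 1
--             while j < len(tokens) and len(tokens[j]) == 1 and tokens[j].isalpha():
--                 group.append(tokens[j])
--                 j += 1
--             if len(group) >= 2:
--                 result.append("".join(group))
--                 i = j
--                 continue
--
--         # Siffersekvens: 1–2 siffror per token (hanterar '19 3 8', '1 9 3 8')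
--         elif 1 <= len(tok) <= 2 and tok.isdigit():
--             group = [tok]
--             j = i + 1
--             while j < len(tokens) and 1 <= len(tokens[j]) <= 2 and tokens[j].isdigit():
--                 group.append(tokens[j])
--                 j += 1
--             if len(group) >= 2:
--                 result.append("".join(group))
--                 i = j
--                 continue
--
--         result.append(tok)
--         i += 1
--
--     return " ".join(result)
-- ===== SOURCE B (Python) =====
-- def _cls(t):
--     """Token class: 1 = single letter, 2 = 1-2 digit group, 0 = anything else."""
--     if len(t) == 1 and t.isalpha():
--         return 1
--     if 1 <= len(t) <= 2 and t.isdigit():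
--         return 2
--     return 0
--
--
-- def _flush(out, run, runc):
--     """Emit a finished run: mergeable runs of length >= 2 are joined, the rest kept as-is."""
--     if runc != 0 and len(run) >= 2:
--         out.append("".join(run))
--     else:
--         out.extend(run)
--
--
-- def normalize_ocr_spacing(text: str) -> str:
--     """Classify each token, then merge maximal runs of equal mergeable class in one pass."""
--     out = []
--     run = []
--     runc = 0
--     for t in text.split(" "):
--         c = _cls(t)
--         if run and c != runc:
--             _flush(out, run, runc)
--             run = []
--         run.append(t)
--         runc = c
--     _flush(out, run, runc)
--     return " ".join(out)
-- ===== Notes on version B (the rewrite author's own statement) =====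
-- stated objective: alternative
-- what changed: A's index-driven outer while loop with two greedy inner scans and index jumps is replaced by a classify-then-group single pass: each token is mapped to a class (single letter / 1-2 digit / other) and one fold merges maximal runs of equal mergeable class via a run accumulator.
import Mathlib
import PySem

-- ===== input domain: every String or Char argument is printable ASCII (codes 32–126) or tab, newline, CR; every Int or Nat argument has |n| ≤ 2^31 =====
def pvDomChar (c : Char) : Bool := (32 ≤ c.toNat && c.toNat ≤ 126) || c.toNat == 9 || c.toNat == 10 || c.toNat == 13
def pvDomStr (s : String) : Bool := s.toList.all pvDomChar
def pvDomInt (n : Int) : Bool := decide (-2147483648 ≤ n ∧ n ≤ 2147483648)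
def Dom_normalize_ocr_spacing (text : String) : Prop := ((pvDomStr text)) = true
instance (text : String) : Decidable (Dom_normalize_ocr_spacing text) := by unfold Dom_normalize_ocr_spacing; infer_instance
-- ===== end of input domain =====

-- B replaces A's nested index-jumping while loops by a classify-then-group single pass
-- (map each token to a class, merge maximal runs of equal mergeable class); same cost, alternative decomposition.

-- ===== PORT A =====

-- A's letter-token test: len(tok) == 1 and tok.isalpha()
def pvTokLetter (t : String) : Bool := PySem.Str.len t == 1 && PySem.Str.strIsalpha t
-- A's digit-token test: 1 <= len(tok) <= 2 and tok.isdigit()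
def pvTokDigit (t : String) : Bool :=
  (decide (1 ≤ PySem.Str.len t) && decide (PySem.Str.len t ≤ 2)) && PySem.Str.strIsdigit t

-- A's inner 'while j < len(tokens) and <pred>(tokens[j])' collection: the taken prefix and the rest
def pvSpanA (p : String → Bool) : List String → List String × List String
  | [] => ([], [])
  | t :: r => if p t then let s := pvSpanA p r; (t :: s.1, s.2) else ([], t :: r)

theorem pvSpanA_snd_length_le (p : String → Bool) (l : List String) :
    (pvSpanA p l).2.length ≤ l.length := by
  induction l with
  | nil => simp [pvSpanA]
  | cons t r ih =>
      simp only [pvSpanA]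
      split
      · simpa using Nat.le_succ_of_le ih
      · simp

-- A's outer while loop over the token list, index jumps rendered as recursion on the suffix
def pvLoopA : List String → List String
  | [] => []
  | tok :: rest =>
    if pvTokLetter tok then
      let s := pvSpanA pvTokLetter rest
      if s.1.length + 1 ≥ 2 then
        PySem.Str.join "" (tok :: s.1) :: pvLoopA s.2
      else tok :: pvLoopA rest
    else if pvTokDigit tok then
      let s := pvSpanA pvTokDigit rest
      if s.1.length + 1 ≥ 2 then
        PySem.Str.join "" (tok :: s.1) :: pvLoopA s.2
      else tok :: pvLoopA rest
    else tok :: pvLoopA rest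
termination_by l => l.length
decreasing_by
  · exact Nat.lt_succ_of_le (pvSpanA_snd_length_le _ _)
  · simp
  · exact Nat.lt_succ_of_le (pvSpanA_snd_length_le _ _)
  · simp
  · simp

def normalize_ocr_spacing (text : String) : String :=
  PySem.Str.join " " (pvLoopA ((PySem.Str.split? text " ").getD []))

-- ===== PORT B =====

-- Source B _cls: 1 = single letter, 2 = 1-2 digit group, 0 = anything else
def pvClsB (t : String) : Nat :=
  if PySem.Str.len t == 1 && PySem.Str.strIsalpha t then 1
  else if (decide (1 ≤ PySem.Str.len t) && decide (PySem.Str.len t ≤ 2)) && PySem.Str.strIsdigit t then 2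
  else 0

-- Source B _flush: emit a finished run (mergeable runs of length >= 2 joined, the rest as-is)
def pvFlushB (out : List String) (run : List String) (runc : Nat) : List String :=
  if runc ≠ 0 ∧ run.length ≥ 2 then out ++ [PySem.Str.join "" run] else out ++ run

-- Source B loop body: state (out, run, runc)
def pvStepB (st : List String × List String × Nat) (t : String) : List String × List String × Nat :=
  let c := pvClsB t
  if st.2.1 ≠ [] ∧ c ≠ st.2.2 then (pvFlushB st.1 st.2.1 st.2.2, [t], c)
  else (st.1, st.2.1 ++ [t], c)

def normalize_ocr_spacing_alt (text : String) : String :=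
  let st := ((PySem.Str.split? text " ").getD []).foldl pvStepB ([], [], 0)
  PySem.Str.join " " (pvFlushB st.1 st.2.1 st.2.2)

-- ===== PRECONDITION & SPEC =====
def Spec_normalize_ocr_spacing (text : String) (out : String) : Prop := out = normalize_ocr_spacing_alt text
instance (text : String) (out : String) : Decidable (Spec_normalize_ocr_spacing text out) := by unfold Spec_normalize_ocr_spacing; infer_instance

-- ===== CLAIM (what is proved, stated in full; the proofs are below) =====
def Claim_equal_normalize_ocr_spacing : Prop := ∀ (text : String), Dom_normalize_ocr_spacing text → Spec_normalize_ocr_spacing text (normalize_ocr_spacing text)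

-- ===== LEMMAS AND PROOFS =====

-- a single char cannot be both a Python letter and a Python digit
theorem pvChar_disj (c : Char) :
    PySem.Chars.isalpha c = true → PySem.Chars.isdigit c = false := by
  intro h
  simp only [PySem.Chars.isalpha, PySem.Chars.isupper, PySem.Chars.islower, Bool.or_eq_true,
    Bool.and_eq_true, decide_eq_true_eq] at h
  simp only [PySem.Chars.isdigit, Bool.and_eq_false_iff, decide_eq_false_iff_not, not_le]
  rcases h with ⟨h1, -⟩ | ⟨h1, -⟩
  · exact Or.inr (lt_of_lt_of_le (by decide) h1)
  · exact Or.inr (lt_of_lt_of_le (by decide) h1)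

theorem pvTok_disj (t : String) : pvTokLetter t = true → pvTokDigit t = false := by
  intro h
  simp only [pvTokLetter, Bool.and_eq_true] at h
  obtain ⟨-, ha⟩ := h
  simp only [PySem.Str.strIsalpha, PySem.Chars.strIsalpha, Bool.and_eq_true,
    List.all_eq_true] at ha
  obtain ⟨hne, hall⟩ := ha
  have hne' : t.toList ≠ [] := by simpa using hne
  obtain ⟨c, hc⟩ := List.exists_mem_of_ne_nil _ hne'
  simp only [pvTokDigit, PySem.Str.strIsdigit, PySem.Chars.strIsdigit, Bool.and_eq_false_iff]
  right; right
  simp only [List.all_eq_false]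
  exact ⟨c, hc, by simp [pvChar_disj c (hall c hc)]⟩

-- pvClsB written through A's two token tests (definitional)
theorem pvClsB_eq (t : String) :
    pvClsB t = if pvTokLetter t then 1 else if pvTokDigit t then 2 else 0 := rfl

theorem pvCls_eq_one (t : String) : pvClsB t = 1 ↔ pvTokLetter t = true := by
  rw [pvClsB_eq]
  rcases hl : pvTokLetter t
  · rcases hd : pvTokDigit t <;> simp
  · simp

theorem pvCls_eq_two (t : String) : pvClsB t = 2 ↔ pvTokDigit t = true := by
  rw [pvClsB_eq]
  rcases hl : pvTokLetter t
  · rcases hd : pvTokDigit t <;> simp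
  · simp [pvTok_disj t hl]

theorem pvCls_eq_zero (t : String) :
    pvClsB t = 0 ↔ pvTokLetter t = false ∧ pvTokDigit t = false := by
  rw [pvClsB_eq]
  rcases hl : pvTokLetter t
  · rcases hd : pvTokDigit t <;> simp
  · simp

-- pvSpanA only looks at the predicate's values
theorem pvSpanA_congr (p q : String → Bool) (h : ∀ t, p t = q t) (l : List String) :
    pvSpanA p l = pvSpanA q l := by
  induction l with
  | nil => rfl
  | cons t r ih => simp only [pvSpanA, h t, ih]

-- if the span took nothing, the rest is the whole list
theorem pvSpanA_nil_snd (p : String → Bool) (l : List String)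
    (h : (pvSpanA p l).1 = []) : (pvSpanA p l).2 = l := by
  cases l with
  | nil => simp [pvSpanA]
  | cons u us =>
      rcases hp : p u
      · simp [pvSpanA, hp]
      · simp [pvSpanA, hp] at h

-- A passes a maximal run of class-0 tokens through unchanged, one by one
theorem pvLoopA_span0 (l : List String) :
    pvLoopA l = (pvSpanA (fun t => pvClsB t == 0) l).1 ++ pvLoopA (pvSpanA (fun t => pvClsB t == 0) l).2 := by
  induction l with
  | nil => simp [pvSpanA, pvLoopA]
  | cons t r ih =>
      rcases h : pvClsB t == 0
      · simp [pvSpanA, h]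
      · have h0 : pvClsB t = 0 := by simpa using h
        obtain ⟨h1, h2⟩ := (pvCls_eq_zero t).mp h0
        rw [pvLoopA]
        simp only [h1, h2, Bool.false_eq_true, if_false]
        simp only [pvSpanA, h, if_true]
        simpa using ih

-- characterization of A's step on a nonempty token list, phrased with B's class and flush
theorem pvLoopA_char (tok : String) (rest : List String) :
    pvLoopA (tok :: rest) =
      pvFlushB [] (tok :: (pvSpanA (fun t => pvClsB t == pvClsB tok) rest).1) (pvClsB tok) ++
        pvLoopA (pvSpanA (fun t => pvClsB t == pvClsB tok) rest).2 := by
  rcases h1 : pvTokLetter tok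
  · rcases h2 : pvTokDigit tok
    · -- class 0: token passed through, following class-0 run passed through too
      have hc : pvClsB tok = 0 := (pvCls_eq_zero tok).mpr ⟨h1, h2⟩
      rw [hc, pvLoopA]
      simp only [h1, h2, Bool.false_eq_true, if_false]
      simp only [pvFlushB]
      rw [if_neg (by simp)]
      simpa using pvLoopA_span0 rest
    · -- class 2: A's digit branch
      have hc : pvClsB tok = 2 := (pvCls_eq_two tok).mpr h2
      rw [hc]
      have hsp : pvSpanA (fun t => pvClsB t == 2) rest = pvSpanA pvTokDigit rest :=
        pvSpanA_congr _ _ (fun t => by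
          rcases h : pvTokDigit t
          · simp
            intro hh
            exact absurd ((pvCls_eq_two t).mp hh) (by simp [h])
          · simp [(pvCls_eq_two t).mpr h]) rest
      rw [hsp, pvLoopA]
      simp only [h1, h2, Bool.false_eq_true, if_false, if_true]
      rcases hg : (pvSpanA pvTokDigit rest).1 with _ | ⟨g0, gs⟩
      · rw [pvSpanA_nil_snd _ _ hg]
        simp [pvFlushB]
      · simp [pvFlushB]
  · -- class 1: A's letter branch
    have hc : pvClsB tok = 1 := (pvCls_eq_one tok).mpr h1
    rw [hc]
    have hsp : pvSpanA (fun t => pvClsB t == 1) rest = pvSpanA pvTokLetter rest :=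
      pvSpanA_congr _ _ (fun t => by
        rcases h : pvTokLetter t
        · simp
          intro hh
          exact absurd ((pvCls_eq_one t).mp hh) (by simp [h])
        · simp [(pvCls_eq_one t).mpr h]) rest
    rw [hsp, pvLoopA]
    simp only [h1, if_true]
    rcases hg : (pvSpanA pvTokLetter rest).1 with _ | ⟨g0, gs⟩
    · rw [pvSpanA_nil_snd _ _ hg]
      simp [pvFlushB]
    · simp [pvFlushB]

theorem pvFlushB_append (out run : List String) (runc : Nat) :
    pvFlushB out run runc = out ++ pvFlushB [] run runc := by
  unfold pvFlushB; split <;> simp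

-- loop invariant for B's fold: a nonempty pending run of class runc
theorem pvFoldB_inv (tokens : List String) :
    ∀ (out run : List String) (runc : Nat), run ≠ [] → (∀ t ∈ run, pvClsB t = runc) →
      (let st := tokens.foldl pvStepB (out, run, runc);
       pvFlushB st.1 st.2.1 st.2.2) =
      out ++ pvFlushB [] (run ++ (pvSpanA (fun t => pvClsB t == runc) tokens).1) runc ++
        pvLoopA (pvSpanA (fun t => pvClsB t == runc) tokens).2 := by
  induction tokens with
  | nil =>
      intro out run runc _ _
      simp [pvSpanA, pvLoopA, pvFlushB_append out run runc]
  | cons t ts ih =>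
      intro out run runc hne hall
      by_cases hc : pvClsB t = runc
      · have hstep : pvStepB (out, run, runc) t = (out, run ++ [t], runc) := by
          simp [pvStepB, hc]
        simp only [List.foldl_cons, hstep]
        have := ih out (run ++ [t]) runc (by simp)
          (by intro u hu; rcases List.mem_append.mp hu with h | h
              · exact hall u h
              · simp at h; subst h; exact hc)
        simp only [pvSpanA, hc, BEq.rfl, if_true] at this ⊢
        simpa [List.append_assoc] using this
      · have hstep : pvStepB (out, run, runc) t = (pvFlushB out run runc, [t], pvClsB t) := by
          simp [pvStepB, hne, hc]
        simp only [List.foldl_cons, hstep]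
        have := ih (pvFlushB out run runc) [t] (pvClsB t) (by simp) (by simp)
        simp only at this
        rw [this]
        simp only [pvSpanA, beq_iff_eq, hc, if_false, List.append_nil, List.singleton_append]
        rw [pvFlushB_append out run runc, List.append_assoc]
        congr 2
        rw [pvLoopA_char t ts]

-- the two ports agree on every token list
theorem pv_tokens_eq (tokens : List String) :
    (let st := tokens.foldl pvStepB ([], [], 0);
     pvFlushB st.1 st.2.1 st.2.2) = pvLoopA tokens := by
  cases tokens with
  | nil => simp [pvLoopA, pvFlushB]
  | cons t ts =>
      have hstep : pvStepB ([], [], 0) t = ([], [t], pvClsB t) := by simp [pvStepB]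
      simp only [List.foldl_cons, hstep]
      have := pvFoldB_inv ts [] [t] (pvClsB t) (by simp) (by simp)
      simp only at this
      rw [this, pvLoopA_char t ts]
      simp

-- ===== VERDICT (by name: the statement is the Claim_ definition above) =====
theorem normalize_ocr_spacing_spec : Claim_equal_normalize_ocr_spacing := by
  intro text _
  unfold Spec_normalize_ocr_spacing normalize_ocr_spacing normalize_ocr_spacing_alt
  exact congrArg (PySem.Str.join " ") (pv_tokens_eq _).symm
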